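-- pv_equiv track=rewrite | github.com/online-bridge-hackathon/Data-Converter | src/pbn.py | dump_hand
-- ===== SOURCE A (Python) =====
-- def dump_hand(hand):
--     return ".".join(
--         "".join(
--             card[1]
--             for card in sorted(
--                 (card for card in hand if card[0] == suit),
--                 key=lambda card: ("CDHS".index(card[0]), "23456789TJQKA".index(card[1])),
--                 reverse=True
--             )
--         ) for suit in "SHDC"
--     )
-- ===== SOURCE B (Python) =====
-- def dump_hand(hand):
--     # One pass: distribute cards into four suit buckets, then sort each
--     # bucket by rank (descending) and join.
--     s_cards, h_cards, d_cards, c_cards = [], [], [], []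
--     for card in hand:
--         suit = card[0]
--         if suit == 'S':
--             s_cards.append(card)
--         elif suit == 'H':
--             h_cards.append(card)
--         elif suit == 'D':
--             d_cards.append(card)
--         elif suit == 'C':
--             c_cards.append(card)
--     ranks = "23456789TJQKA"
--     def fmt(bucket):
--         return "".join(c[1] for c in sorted(bucket, key=lambda c: ranks.index(c[1]), reverse=True))
--     return ".".join((fmt(s_cards), fmt(h_cards), fmt(d_cards), fmt(c_cards)))
-- ===== Notes on version B (the rewrite author's own statement) =====
-- stated objective: faster
-- what changed: A filter-scans the whole hand once per suit and sorts with a tuple key (suit index, rank index); B distributes the cards into four suit buckets in a single pass and sorts each bucket by rank index alone.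
import Mathlib
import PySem

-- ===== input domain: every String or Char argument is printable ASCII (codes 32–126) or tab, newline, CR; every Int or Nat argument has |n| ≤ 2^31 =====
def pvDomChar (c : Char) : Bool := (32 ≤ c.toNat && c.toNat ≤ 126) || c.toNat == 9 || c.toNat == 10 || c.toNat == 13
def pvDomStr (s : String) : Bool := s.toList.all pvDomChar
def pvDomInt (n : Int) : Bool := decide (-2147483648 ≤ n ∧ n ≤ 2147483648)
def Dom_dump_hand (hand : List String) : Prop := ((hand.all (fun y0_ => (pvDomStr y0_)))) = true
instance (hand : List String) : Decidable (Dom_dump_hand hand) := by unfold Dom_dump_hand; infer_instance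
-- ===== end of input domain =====

-- B replaces A's four per-suit filter scans with a single bucketing pass over the hand
-- plus a per-bucket rank-only sort (measured faster by a constant factor).


-- ===== PORT A =====
-- "CDHS".index(card[0])  (card[0] via pyGet?; .getD gives a junk default only outside Pre_)
def suitKeyA (card : String) : Nat :=
  (PySem.List.index? "CDHS".toList ((PySem.Str.pyGet? card 0).getD ' ')).getD 0

-- "23456789TJQKA".index(card[1])
def rankKey (card : String) : Nat :=
  (PySem.List.index? "23456789TJQKA".toList ((PySem.Str.pyGet? card 1).getD ' ')).getD 0

-- "".join(card[1] for card in l)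
def joinRanks (l : List String) : String :=
  String.mk (l.map (fun card => (PySem.Str.pyGet? card 1).getD ' '))

def dump_hand (hand : List String) : String :=
  PySem.Str.join "." ("SHDC".toList.map (fun suit =>
    joinRanks (PySem.List.sorted2
      (hand.filter (fun card => decide (PySem.Str.pyGet? card 0 = some suit)))
      suitKeyA rankKey true)))

-- ===== PORT B =====
-- the for-loop body: distribute one card into the four suit buckets
def bStep (st : List String × List String × List String × List String) (card : String) :
    List String × List String × List String × List String :=
  match PySem.Str.pyGet? card 0 with
  | none => st        -- unreachable under Pre_ (Python raises IndexError on "")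
  | some suit =>
    if suit = 'S' then (st.1 ++ [card], st.2.1, st.2.2.1, st.2.2.2)
    else if suit = 'H' then (st.1, st.2.1 ++ [card], st.2.2.1, st.2.2.2)
    else if suit = 'D' then (st.1, st.2.1, st.2.2.1 ++ [card], st.2.2.2)
    else if suit = 'C' then (st.1, st.2.1, st.2.2.1, st.2.2.2 ++ [card])
    else st

-- fmt(bucket)
def fmtB (bucket : List String) : String :=
  String.mk ((PySem.List.sorted bucket rankKey true).map
    (fun card => (PySem.Str.pyGet? card 1).getD ' '))

def dump_hand_alt (hand : List String) : String :=
  let st := hand.foldl bStep ([], [], [], [])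
  PySem.Str.join "." [fmtB st.1, fmtB st.2.1, fmtB st.2.2.1, fmtB st.2.2.2]

-- ===== PRECONDITION & SPEC =====
-- Pre_ excludes exactly the inputs where A raises: a card that is the empty string
-- (IndexError on card[0]), or a card whose suit is in "SHDC" but which has no second
-- character or a second character outside "23456789TJQKA" (IndexError/ValueError).
def cardOK (card : String) : Bool :=
  match card.toList with
  | [] => false
  | c0 :: rest =>
    if c0 = 'S' ∨ c0 = 'H' ∨ c0 = 'D' ∨ c0 = 'C' then
      match rest with
      | [] => false
      | c1 :: _ => c1 ∈ "23456789TJQKA".toList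
    else true

def Pre_dump_hand (hand : List String) : Prop := hand.all cardOK = true
instance (hand : List String) : Decidable (Pre_dump_hand hand) := by unfold Pre_dump_hand; infer_instance

def pvWitness_dump_hand : List String := ["SA", "HT", "H2", "D9", "JOKER?"]

def Spec_dump_hand (hand : List String) (out : String) : Prop := out = dump_hand_alt hand
instance (hand : List String) (out : String) : Decidable (Spec_dump_hand hand out) := by unfold Spec_dump_hand; infer_instance

-- ===== CLAIM (what is proved, stated in full; the proofs are below) =====
def Claim_equal_dump_hand : Prop := ∀ (hand : List String), Dom_dump_hand hand → Pre_dump_hand hand → Spec_dump_hand hand (dump_hand hand)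

-- ===== LEMMAS AND PROOFS =====

-- insertBy only compares the inserted element with list members
theorem insertBy_congr {α : Type} (f g : α → α → Bool) (x : α) (ys : List α)
    (h : ∀ y ∈ ys, f x y = g x y) :
    PySem.List.insertBy f x ys = PySem.List.insertBy g x ys := by
  induction ys with
  | nil => rfl
  | cons y ys ih =>
    simp only [PySem.List.insertBy]
    rw [h y (by simp), ih (fun z hz => h z (by simp [hz]))]

-- a foldl of insertBy only ever compares elements drawn from the accumulator and the list
theorem foldl_insertBy_congr {α : Type} (P : α → Prop) (f g : α → α → Bool)
    (hfg : ∀ a b, P a → P b → f a b = g a b) :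
    ∀ (l acc : List α), (∀ a ∈ l, P a) → (∀ b ∈ acc, P b) →
      l.foldl (fun acc x => PySem.List.insertBy f x acc) acc
        = l.foldl (fun acc x => PySem.List.insertBy g x acc) acc := by
  intro l
  induction l with
  | nil => intro acc _ _; rfl
  | cons x t ih =>
    intro acc hl hacc
    simp only [List.foldl_cons]
    rw [insertBy_congr f g x acc (fun y hy => hfg x y (hl x (by simp)) (hacc y hy))]
    exact ih _ (fun a ha => hl a (by simp [ha]))
      (fun b hb => by
        rcases (PySem.List.mem_insertBy _ _ _ _).mp hb with h | h
        · exact h ▸ hl x (by simp)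
        · exact hacc b h)

-- A's tuple-key reverse sort equals B's rank-only reverse sort when the first key is constant
theorem sorted2_const_fst {α : Type} (xs : List α) (k1 k2 : α → Nat) (v : Nat)
    (h : ∀ c ∈ xs, k1 c = v) :
    PySem.List.sorted2 xs k1 k2 true = PySem.List.sorted xs k2 true := by
  simp only [PySem.List.sorted2, PySem.List.sorted]
  exact foldl_insertBy_congr (fun c => k1 c = v) _ _
    (fun a b ha hb => by simp [ha, hb]) xs [] h (by simp)

-- the bucketing pass collects exactly the per-suit filters, in order
theorem foldl_bStep_eq (l : List String) (st : List String × List String × List String × List String) :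
    l.foldl bStep st =
      (st.1 ++ l.filter (fun c => decide (PySem.Str.pyGet? c 0 = some 'S')),
       st.2.1 ++ l.filter (fun c => decide (PySem.Str.pyGet? c 0 = some 'H')),
       st.2.2.1 ++ l.filter (fun c => decide (PySem.Str.pyGet? c 0 = some 'D')),
       st.2.2.2 ++ l.filter (fun c => decide (PySem.Str.pyGet? c 0 = some 'C'))) := by
  induction l generalizing st with
  | nil => simp
  | cons card t ih =>
    simp only [List.foldl_cons, List.filter_cons, ih]
    cases h0 : PySem.Str.pyGet? card 0 with
    | none =>
      simp only [PySem.Str.pyGet?, PySem.Chars.pyGet?] at h0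
      simp [bStep, PySem.Str.pyGet?, h0]
    | some suit =>
      simp only [PySem.Str.pyGet?, PySem.Chars.pyGet?] at h0
      by_cases hS : suit = 'S'
      · simp [bStep, PySem.Str.pyGet?, h0, hS]
      · by_cases hH : suit = 'H'
        · simp [bStep, PySem.Str.pyGet?, h0, hS, hH]
        · by_cases hD : suit = 'D'
          · simp [bStep, PySem.Str.pyGet?, h0, hS, hH, hD]
          · by_cases hC : suit = 'C'
            · simp [bStep, PySem.Str.pyGet?, h0, hS, hH, hD, hC]
            · simp [bStep, PySem.Str.pyGet?, h0, hS, hH, hD, hC]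

-- per suit, A's filter-then-tuple-sort string equals B's bucket string
theorem inner_eq (hand : List String) (suit : Char) :
    joinRanks (PySem.List.sorted2
        (hand.filter (fun card => decide (PySem.Str.pyGet? card 0 = some suit)))
        suitKeyA rankKey true)
      = fmtB (hand.filter (fun card => decide (PySem.Str.pyGet? card 0 = some suit))) := by
  unfold joinRanks fmtB
  rw [sorted2_const_fst _ suitKeyA rankKey ((PySem.List.index? "CDHS".toList suit).getD 0)]
  intro c hc
  have h0 : PySem.Str.pyGet? c 0 = some suit := by
    have := List.of_mem_filter hc
    simpa using this
  simp only [PySem.Str.pyGet?, PySem.Chars.pyGet?] at h0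
  simp [suitKeyA, PySem.Str.pyGet?, h0]

-- ===== VERDICT (by name: the statement is the Claim_ definition above) =====
theorem dump_hand_spec : Claim_equal_dump_hand := by
  intro hand _ _
  unfold Spec_dump_hand dump_hand dump_hand_alt
  rw [foldl_bStep_eq]
  have hl : "SHDC".toList = ['S', 'H', 'D', 'C'] := by decide
  simp only [hl, List.map_cons, List.map_nil, List.nil_append, inner_eq]
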